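-- pv_equiv track=rewrite | github.com/MrBrantCode/unitest_baseline | mut_generate/mist_train_cf/cf_62892/solution.py | check
-- ===== SOURCE A (Python) =====
-- import string
--
-- def check(sentence):
--     def normalize(word):
--         return word.strip(string.punctuation).lower()
--
--     def is_palindrome(word):
--         return word == word[::-1]
--
--     def is_anagram(word, words):
--         sorted_char_list = sorted(word)
--         for _word in words:
--             if sorted_char_list != sorted(_word):
--                 return False
--         return True
--
--     words = sentence.split()
--     words = [normalize(word) for word in words]
--
--     for word in words:
--         if not is_palindrome(word):
--             return "The sentence is not composed of palindromes."
--
--     if len(set(words)) < 2: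
--         return "The sentence is composed of palindromes. However, the words are not anagrams of each other."
--
--     first_word = words[0]
--     remainder_words = words[1:]
--
--     if is_anagram(first_word, remainder_words):
--         return "The sentence is composed of palindromes and every word is an anagram of each other."
--     else:
--         return "The sentence is composed of palindromes. However, the words are not anagrams of each other."
-- ===== SOURCE B (Python) =====
-- import string
--
-- def check(sentence):
--     # Single pass with accumulators: recursive ends-inward palindrome test,
--     # anagram test by character counts against the first word (no sorting, no sets).
--     def is_pal(w):
--         return len(w) < 2 or (w[0] == w[-1] and is_pal(w[1:-1]))
--
--     first = None
--     distinct = False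
--     anagrams = True
--     for raw in sentence.split():
--         w = raw.strip(string.punctuation).lower()
--         if not is_pal(w):
--             return "The sentence is not composed of palindromes."
--         if first is None:
--             first = w
--         else:
--             if w != first:
--                 distinct = True
--             if any(w.count(c) != first.count(c) for c in w + first):
--                 anagrams = False
--     if distinct and anagrams:
--         return "The sentence is composed of palindromes and every word is an anagram of each other."
--     return "The sentence is composed of palindromes. However, the words are not anagrams of each other."
-- ===== Notes on version B (the rewrite author's own statement) =====
-- stated objective: alternative
-- what changed: Replaces A's staged passes (palindrome loop, set() cardinality, first-vs-rest sorted-list scan) by a single pass over the words with accumulators, testing palindromes by ends-inward recursion and anagram-hood by character counts against the first word, with no sorting and no set.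
import Mathlib
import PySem

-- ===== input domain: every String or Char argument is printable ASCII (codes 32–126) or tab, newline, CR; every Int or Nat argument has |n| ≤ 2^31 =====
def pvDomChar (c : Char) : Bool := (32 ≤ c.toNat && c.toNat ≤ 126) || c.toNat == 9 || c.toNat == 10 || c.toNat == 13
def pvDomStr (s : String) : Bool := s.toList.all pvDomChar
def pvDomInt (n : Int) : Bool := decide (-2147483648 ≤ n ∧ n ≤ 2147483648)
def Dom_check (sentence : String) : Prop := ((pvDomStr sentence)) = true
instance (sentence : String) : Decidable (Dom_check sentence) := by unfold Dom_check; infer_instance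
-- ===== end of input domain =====

-- B replaces A's staged passes (palindrome loop, set() cardinality, first-vs-rest sorted scan)
-- by a single pass with accumulators: an ends-inward recursive palindrome test and an anagram
-- test by character counts against the first word (no sorting, no set) — alternative decomposition.

-- string.punctuation
def pvPunct : String := "!\"#$%&'()*+,-./:;<=>?@[\\]^_`{|}~"

-- ===== PORT A =====
def normA (w : String) : String := PySem.Str.lower (PySem.Str.stripChars w pvPunct)
-- word == word[::-1]; s[::-1] is the reversed string (PySem.Str.slice?_none_none_neg_one)
def isPalA (w : String) : Bool := w.toList == w.toList.reverse
def sortedA (w : String) : List Char := PySem.List.sorted w.toList (fun c => c) false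
def isAnagramA (sc : List Char) : List String → Bool
  | [] => true
  | w :: ws => if sc ≠ sortedA w then false else isAnagramA sc ws
def checkRestA (words : List String) : String :=
  if (PySem.Set.ofList words).length < 2 then
    "The sentence is composed of palindromes. However, the words are not anagrams of each other."
  else
    let first := words.headD ""          -- words[0]; words ≠ [] here since |set(words)| ≥ 2
    let remainder := PySem.List.slice words (some 1) none   -- words[1:]
    if isAnagramA (sortedA first) remainder then
      "The sentence is composed of palindromes and every word is an anagram of each other."
    else
      "The sentence is composed of palindromes. However, the words are not anagrams of each other."
def palLoopA (all : List String) : List String → String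
  | [] => checkRestA all
  | w :: ws =>
    if !isPalA w then "The sentence is not composed of palindromes."
    else palLoopA all ws
def check (sentence : String) : String :=
  let words := (PySem.Str.split₀ sentence).map normA
  palLoopA words words

-- ===== PORT B =====
def normB (w : String) : String := PySem.Str.lower (PySem.Str.stripChars w pvPunct)
-- is_pal: len(w) < 2 or (w[0] == w[-1] and is_pal(w[1:-1])); on cs = c :: rest
-- cs[0] = c, cs[-1] = rest.getLast, cs[1:-1] = rest.dropLast (exact for these slices)
def palB : List Char → Bool
  | [] => true
  | [_] => true
  | c :: rest => (c == rest.getLastD c) && palB rest.dropLast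
termination_by cs => cs.length
decreasing_by simp [List.length_dropLast]
-- any(w.count(c) != first.count(c) for c in w + first); str.count of a one-char needle
-- is exactly the character count, ported as List.count over the character lists
def countBad (w f : String) : Bool :=
  (w.toList ++ f.toList).any (fun c => w.toList.count c != f.toList.count c)
def loopB : List String → Option String → Bool → Bool → String
  | [], _, distinct, anagrams =>
    if distinct && anagrams then
      "The sentence is composed of palindromes and every word is an anagram of each other."
    else
      "The sentence is composed of palindromes. However, the words are not anagrams of each other."
  | raw :: rest, first, distinct, anagrams =>
    let w := normB raw
    if !palB w.toList then "The sentence is not composed of palindromes."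
    else
      match first with
      | none => loopB rest (some w) distinct anagrams
      | some f =>
          loopB rest (some f)
            (if w ≠ f then true else distinct)
            (if countBad w f then false else anagrams)
def check_alt (sentence : String) : String :=
  loopB (PySem.Str.split₀ sentence) none false true

-- ===== PRECONDITION & SPEC =====
def Spec_check (sentence : String) (out : String) : Prop := out = check_alt sentence
instance (sentence : String) (out : String) : Decidable (Spec_check sentence out) := by unfold Spec_check; infer_instance

-- ===== CLAIM (what is proved, stated in full; the proofs are below) =====
def Claim_equal_check : Prop := ∀ (sentence : String), Dom_check sentence → Spec_check sentence (check sentence)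

-- ===== LEMMAS AND PROOFS =====

def msgP : String := "The sentence is not composed of palindromes."
def msgA : String := "The sentence is composed of palindromes and every word is an anagram of each other."
def msgN : String := "The sentence is composed of palindromes. However, the words are not anagrams of each other."

lemma palB_eq (cs : List Char) : palB cs = (cs == cs.reverse) := by
  induction cs using palB.induct with
  | case1 => simp [palB]
  | case2 c => simp [palB]
  | case3 c rest hne ih =>
    have hrest : rest ≠ [] := fun h => hne h
    obtain ⟨ms, d, hdec⟩ : ∃ ms d, rest = ms ++ [d] :=
      ⟨rest.dropLast, rest.getLast hrest, (List.dropLast_append_getLast hrest).symm⟩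
    subst hdec
    rw [palB]
    · simp only [List.getLastD_concat, List.dropLast_concat] at ih ⊢
      rw [ih]
      rcases eq_or_ne c d with h | h
      · subst h
        simp
      · simp [beq_eq_false_iff_ne.mpr h]
    · simp

lemma countBad_eq (x w : String) : (!countBad x w) = (sortedA x == sortedA w) := by
  rw [Bool.eq_iff_iff, Bool.not_eq_true', beq_iff_eq, sortedA, sortedA,
    PySem.List.sorted_id_eq_sorted_id_iff_perm, List.perm_iff_count]
  unfold countBad
  simp only [List.any_eq_false, List.mem_append, Bool.not_eq_true, bne_eq_false_iff_eq]
  constructor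
  · intro h c
    by_cases hc : c ∈ x.toList ∨ c ∈ w.toList
    · exact h c hc
    · push Not at hc
      rw [List.count_eq_zero_of_not_mem hc.1, List.count_eq_zero_of_not_mem hc.2]
  · exact fun h c _ => h c

lemma palLoopA_eq (all ws : List String) :
    palLoopA all ws =
      if ws.all isPalA then checkRestA all else msgP := by
  induction ws with
  | nil => simp [palLoopA]
  | cons w ws ih =>
    simp only [palLoopA, List.all_cons, ih, Bool.not_eq_true', msgP]
    by_cases h : isPalA w = true <;> simp [h]

lemma isAnagramA_eq (sc : List Char) (ws : List String) :
    isAnagramA sc ws = ws.all fun w => sortedA w == sc := by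
  induction ws with
  | nil => rfl
  | cons w ws ih =>
    simp only [isAnagramA, List.all_cons, ih]
    by_cases h : sc = sortedA w
    · simp [h]
    · simp [h]
      exact fun h' => absurd h'.symm h

lemma setLen_one_iff {α : Type} [BEq α] [LawfulBEq α] (a : α) (l : List α) :
    (PySem.Set.ofList (a :: l)).length = 1 ↔ ∀ x ∈ l, x = a := by
  have key : ((PySem.Set.ofList l).discard a = []) ↔ ∀ x ∈ l, x = a := by
    rw [List.eq_nil_iff_forall_not_mem]
    constructor
    · intro h x hx
      by_contra hne
      exact h x (by rw [PySem.Set.mem_discard, PySem.Set.mem_ofList]; exact ⟨hx, hne⟩)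
    · intro h x hx
      rw [PySem.Set.mem_discard, PySem.Set.mem_ofList] at hx
      exact hx.2 (h x hx.1)
  rw [PySem.Set.ofList_cons, List.length_cons,
    show ∀ n : Nat, (n + 1 = 1 ↔ n = 0) from fun n => by omega,
    List.length_eq_zero_iff, key]

lemma loopB_cons_some (raw : String) (rest : List String) (f : String) (d a : Bool) :
    loopB (raw :: rest) (some f) d a =
      (if !palB (normB raw).toList then msgP
       else loopB rest (some f)
            (if normB raw ≠ f then true else d)
            (if countBad (normB raw) f then false else a)) := rfl

lemma loopB_some (ws : List String) (f : String) (d a : Bool) :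
    loopB ws (some f) d a =
      if (ws.map normB).all (fun w => palB w.toList) then
        (if (d || (ws.map normB).any (fun w => w != f))
            && (a && (ws.map normB).all (fun w => !countBad w f))
         then msgA else msgN)
      else msgP := by
  induction ws generalizing d a with
  | nil => simp [loopB, msgA, msgN]
  | cons raw rest ih =>
    rw [loopB_cons_some]
    simp only [List.map_cons, List.all_cons, List.any_cons]
    by_cases hp : palB (normB raw).toList = true
    · rw [hp]
      simp only [Bool.not_true, Bool.false_eq_true, if_false, Bool.true_and, ih]
      by_cases hall : (rest.map normB).all (fun w => palB w.toList) = true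
      · rw [hall]
        simp only [if_true]
        have hcond : (((if normB raw ≠ f then true else d) || (rest.map normB).any (fun w => w != f))
            && ((if countBad (normB raw) f then false else a) && (rest.map normB).all (fun w => !countBad w f)))
          = ((d || ((normB raw != f) || (rest.map normB).any (fun w => w != f)))
            && (a && ((!countBad (normB raw) f) && (rest.map normB).all (fun w => !countBad w f)))) := by
          by_cases hw : normB raw = f
          · subst hw
            have hc : countBad (normB raw) (normB raw) = false := by simp [countBad]
            cases d <;> cases a <;> simp [hc]
          · by_cases hc : countBad (normB raw) f = true <;>
              cases d <;> cases a <;> simp [hw, hc]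
        rw [hcond]
        rfl
      · simp [hall]
    · simp [hp]

lemma rest_eq (w : String) (rest : List String) :
    checkRestA (w :: rest) =
      if (false || rest.any (fun x => x != w))
          && (true && rest.all (fun x => !countBad x w)) then msgA else msgN := by
  unfold checkRestA
  simp only [Bool.false_or, Bool.true_and, List.headD_cons,
    PySem.List.slice_from_one, List.tail_cons, isAnagramA_eq]
  have hcnt : (fun x => !countBad x w) = (fun x => sortedA x == sortedA w) :=
    funext fun x => countBad_eq x w
  rw [hcnt]
  by_cases hall : ∀ x ∈ rest, x = w
  · have h1 : (PySem.Set.ofList (w :: rest)).length = 1 := (setLen_one_iff w rest).mpr hall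
    have hany : rest.any (fun x => x != w) = false := by
      simp only [List.any_eq_false]
      exact fun x hx => by simp [hall x hx]
    simp [h1, hany, msgN]
  · have h1 : (PySem.Set.ofList (w :: rest)).length ≠ 1 :=
      fun h => hall ((setLen_one_iff w rest).mp h)
    have hge : ¬ (PySem.Set.ofList (w :: rest)).length < 2 := by
      rw [PySem.Set.ofList_cons, List.length_cons] at h1 ⊢
      omega
    have hany : rest.any (fun x => x != w) = true := by
      rw [List.any_eq_true]
      obtain ⟨x, hx, hne⟩ := not_forall₂.mp hall
      exact ⟨x, hx, by simpa using hne⟩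
    simp [hge, hany, msgA, msgN]

theorem check_eq_alt (sentence : String) : check sentence = check_alt sentence := by
  unfold check check_alt
  have hnorm : normB = normA := rfl
  have hpal : (fun w : String => palB w.toList) = isPalA :=
    funext fun w => by rw [palB_eq w.toList]; rfl
  cases hsp : PySem.Str.split₀ sentence with
  | nil => simp [palLoopA_eq, checkRestA, loopB, PySem.Set.ofList]
  | cons raw raws =>
    simp only [List.map_cons]
    rw [palLoopA_eq]
    have hstep : loopB (raw :: raws) none false true =
        (if !palB (normB raw).toList then msgP
         else loopB raws (some (normB raw)) false true) := rfl
    rw [hstep, loopB_some, hnorm, hpal]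
    by_cases hp : isPalA (normA raw) = true
    · have hp' : palB (normA raw).toList = true := by rw [palB_eq]; exact hp
      simp only [hp', Bool.not_true, Bool.false_eq_true, if_false, List.all_cons, hp, Bool.true_and]
      by_cases hall : (raws.map normA).all isPalA = true
      · simp only [hall, if_true, rest_eq, Bool.false_or, Bool.true_and]
      · simp [hall, msgP]
    · have hp' : palB (normA raw).toList = false := by
        rw [palB_eq]; simpa [isPalA] using hp
      simp [hp, hp', msgP]

-- ===== VERDICT (by name: the statement is the Claim_ definition above) =====
theorem check_spec : Claim_equal_check := by
  intro s _
  unfold Spec_check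
  exact check_eq_alt s
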